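-- pv_equiv track=rewrite | github.com/Mintaa911/Competitive-Programming | Week2/mark_and_toys.py | modified_selection_sort
-- ===== SOURCE A (Python) =====
-- def modified_selection_sort(arr,k):
--     arr2 = []
--     balance = 0
--     while len(arr) != 0:
--         min_indx = 0
--         min = arr[min_indx]
--         for i in range(1,len(arr)):
--             if arr[i] < min:
--                 min = arr[i]
--                 min_indx = i
--         balance += min
--         if balance > k:
--             return arr2
--
--         arr2.append(min)
--         arr.pop(min_indx)
--     return arr2
-- ===== SOURCE B (Python) =====
-- # B: sort once (O(n log n)) and take the greedy prefix, instead of A's repeated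
-- # O(n^2) min-scan-and-pop. Return value only: A mutates its arr argument (pop), B does not.
-- def modified_selection_sort(arr, k):
--     out = []
--     balance = 0
--     for x in sorted(arr):
--         balance += x
--         if balance > k:
--             break
--         out.append(x)
--     return out
-- ===== Notes on version B (the rewrite author's own statement) =====
-- stated objective: faster
-- what changed: Replaced the repeated min-scan-and-pop selection loop with a single sort followed by one greedy accumulation pass (A also mutates arr in place; B does not).
import Mathlib
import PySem

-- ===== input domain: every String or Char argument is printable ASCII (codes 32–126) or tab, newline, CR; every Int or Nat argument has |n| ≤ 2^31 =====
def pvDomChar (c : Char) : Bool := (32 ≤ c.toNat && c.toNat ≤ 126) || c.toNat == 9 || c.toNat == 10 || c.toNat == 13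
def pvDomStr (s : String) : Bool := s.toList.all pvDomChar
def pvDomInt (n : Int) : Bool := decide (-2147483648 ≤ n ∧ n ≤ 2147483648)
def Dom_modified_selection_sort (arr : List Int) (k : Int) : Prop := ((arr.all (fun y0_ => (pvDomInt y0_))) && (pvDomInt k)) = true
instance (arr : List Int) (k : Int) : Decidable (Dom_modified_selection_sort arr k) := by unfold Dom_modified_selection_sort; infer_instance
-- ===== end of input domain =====

-- B replaces A's repeated min-scan-and-pop selection loop by one sort plus a greedy
-- accumulation pass (asymptotically faster); A mutates its arr argument in place (pop),
-- B does not — the equivalence proved here is about the return value only.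


-- ===== PORT A =====
-- inner 'for i in range(1, len(arr))' scan carrying (min, min_indx)
def msortMin (arr : List Int) (a : Int) : Int × Int :=
  (PySem.List.pyRange 1 (arr.length : Int)).foldl
    (fun p i => if PySem.List.pyGetD arr i 0 < p.1 then (PySem.List.pyGetD arr i 0, i) else p)
    (a, 0)

-- the 'while len(arr) != 0' loop; fuel = initial length makes it total (one pop per pass)
def msortLoop (k : Int) : Nat → List Int → List Int → Int → List Int
  | 0, _, arr2, _ => arr2
  | fuel + 1, arr, arr2, balance =>
    match arr with
    | [] => arr2
    | a :: _ =>
      let p := msortMin arr a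
      let balance' := balance + p.1
      if balance' > k then arr2
      else
        match PySem.List.pop? arr p.2 with
        | some r => msortLoop k fuel r.2 (arr2 ++ [p.1]) balance'
        | none => arr2   -- unreachable: min_indx is always in range

def modified_selection_sort (arr : List Int) (k : Int) : List Int :=
  msortLoop k arr.length arr [] 0

-- ===== PORT B =====
-- 'for x in sorted(arr): balance += x; if balance > k: break; out.append(x)'
def msortTake (k : Int) : List Int → Int → List Int → List Int
  | [], _, out => out
  | x :: rest, balance, out =>
    if balance + x > k then out else msortTake k rest (balance + x) (out ++ [x])

def modified_selection_sort_alt (arr : List Int) (k : Int) : List Int :=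
  msortTake k (PySem.List.sorted arr (fun x => x) false) 0 []

-- ===== PRECONDITION & SPEC =====
def Spec_modified_selection_sort (arr : List Int) (k : Int) (out : List Int) : Prop := out = modified_selection_sort_alt arr k
instance (arr : List Int) (k : Int) (out : List Int) : Decidable (Spec_modified_selection_sort arr k out) := by unfold Spec_modified_selection_sort; infer_instance

-- ===== CLAIM (what is proved, stated in full; the proofs are below) =====
def Claim_equal_modified_selection_sort : Prop := ∀ (arr : List Int) (k : Int), Dom_modified_selection_sort arr k → Spec_modified_selection_sort arr k (modified_selection_sort arr k)

-- ===== LEMMAS AND PROOFS =====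

-- the inner-scan step, rephrased over enumerated (index, value) pairs
def minStep (p : Int × Int) (iv : Int × Int) : Int × Int :=
  if iv.2 < p.1 then (iv.2, iv.1) else p

-- invariant of the min scan: the result is the initial pair or some (t[j], s+j), and its
-- first component is a lower bound for the initial min and every scanned element
theorem minFold_spec (t : List Int) : ∀ (s : Int) (p : Int × Int),
    ((PySem.List.enumerate t s).foldl minStep p = p ∨
      ∃ (j : Nat) (hj : j < t.length),
        (PySem.List.enumerate t s).foldl minStep p = (t[j], s + j)) ∧
    ((PySem.List.enumerate t s).foldl minStep p).1 ≤ p.1 ∧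
    ∀ y ∈ t, ((PySem.List.enumerate t s).foldl minStep p).1 ≤ y := by
  induction t with
  | nil => intro s p; simp [PySem.List.enumerate_nil]
  | cons x xs ih =>
    intro s p
    rw [PySem.List.enumerate_cons, List.foldl_cons]
    obtain ⟨hshape, hle, hall⟩ := ih (s + 1) (minStep p (s, x))
    refine ⟨?_, ?_, ?_⟩
    · rcases hshape with h | ⟨j, hj, h⟩
      · rw [h]
        by_cases hx : x < p.1
        · right
          refine ⟨0, by simp, ?_⟩
          simp [minStep, hx]
        · left; simp [minStep, hx]
      · right
        refine ⟨j + 1, by simpa using Nat.succ_lt_succ hj, ?_⟩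
        rw [h]; simp; ring
    · refine le_trans hle ?_
      by_cases hx : x < p.1 <;> simp [minStep, hx] <;> omega
    · intro y hy
      rcases List.mem_cons.mp hy with rfl | hy'
      · refine le_trans hle ?_
        by_cases hx : y < p.1 <;> simp [minStep, hx] <;> omega
      · exact hall y hy'

-- the port's min scan IS the enumerate fold, and its result is (arr[j], j) for some j,
-- with arr[j] minimal in arr
theorem msortMin_spec (a : Int) (t : List Int) :
    ∃ (j : Nat) (hj : j < (a :: t).length),
      msortMin (a :: t) a = ((a :: t)[j], (j : Int)) ∧
      ∀ y ∈ a :: t, (a :: t)[j] ≤ y := by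
  set arr := a :: t with harr
  have hlen : 0 < (arr.length : Int) := by simp [harr]
  have hfold : msortMin arr a = (PySem.List.enumerate arr 0).foldl minStep (a, 0) := by
    rw [PySem.List.enumerate_eq_map_pyRange arr 0, List.foldl_map, PySem.List.len_eq,
      PySem.List.pyRange_one_cons hlen, List.foldl_cons]
    have h0 : PySem.List.pyGetD arr 0 0 = a := by simp [harr, PySem.List.pyGetD]
    simp only [minStep, msortMin, h0]
    simp
  obtain ⟨hshape, _, hall⟩ := minFold_spec arr 0 (a, 0)
  rw [← hfold] at hshape hall
  rcases hshape with h | ⟨j, hj, h⟩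
  · exact ⟨0, by simp [harr], by simpa [harr] using h, fun y hy => by
      have := hall y hy; rw [h] at this; simpa [harr] using this⟩
  · refine ⟨j, hj, by simpa using h, fun y hy => ?_⟩
    have := hall y hy; rw [h] at this; simpa using this

-- sorted(arr) starts with the (first) minimum, followed by sorted of arr without it
theorem sorted_min_cons (arr rest : List Int) (m : Int)
    (hperm : (m :: rest).Perm arr) (hmin : ∀ y ∈ arr, m ≤ y) :
    PySem.List.sorted arr (fun x => x) false = m :: PySem.List.sorted rest (fun x => x) false := by
  have hinj : Function.Injective (fun x : Int => x) := fun _ _ h => h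
  rw [PySem.List.sorted_eq_sorted_of_perm arr (m :: rest) (fun x => x) hinj hperm.symm]
  apply PySem.List.eq_of_perm_of_pairwise_le_of_injective (fun x : Int => x) hinj
  · exact (PySem.List.sorted_perm _ _ _).trans (List.Perm.cons m (PySem.List.sorted_perm _ _ _).symm)
  · exact PySem.List.sorted_pairwise _ _
  · refine List.pairwise_cons.mpr ⟨?_, PySem.List.sorted_pairwise _ _⟩
    intro y hy
    exact hmin y (hperm.mem_iff.mp (List.mem_cons_of_mem m ((PySem.List.mem_sorted _ _ _ _).mp hy)))

-- main loop correspondence: A's selection loop computes B's greedy pass over sorted(arr)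
theorem loop_eq (k : Int) : ∀ (fuel : Nat) (arr arr2 : List Int) (balance : Int),
    arr.length ≤ fuel →
    msortLoop k fuel arr arr2 balance =
      msortTake k (PySem.List.sorted arr (fun x => x) false) balance arr2 := by
  intro fuel
  induction fuel with
  | zero =>
    intro arr arr2 balance hle
    have : arr = [] := List.length_eq_zero_iff.mp (Nat.le_zero.mp hle)
    subst this; rfl
  | succ n ih =>
    intro arr arr2 balance hle
    match arr with
    | [] => rfl
    | a :: t =>
      obtain ⟨j, hj, hmin, hall⟩ := msortMin_spec a t
      have hpop : PySem.List.pop? (a :: t) ((j : Int)) =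
          some ((a :: t)[j], (a :: t).eraseIdx j) := PySem.List.pop?_natCast _ j hj
      have hsorted : PySem.List.sorted (a :: t) (fun x => x) false =
          (a :: t)[j] :: PySem.List.sorted ((a :: t).eraseIdx j) (fun x => x) false :=
        sorted_min_cons _ _ _ (List.getElem_cons_eraseIdx_perm hj) hall
      rw [hsorted]
      show (if balance + (msortMin (a :: t) a).1 > k then arr2
        else match PySem.List.pop? (a :: t) (msortMin (a :: t) a).2 with
          | some r => msortLoop k n r.2 (arr2 ++ [(msortMin (a :: t) a).1]) (balance + (msortMin (a :: t) a).1)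
          | none => arr2) = _
      rw [hmin]
      simp only [hpop, msortTake]
      by_cases hb : balance + (a :: t)[j] > k
      · simp [hb]
      · simp only [hb, ite_false]
        have hlen' : ((a :: t).eraseIdx j).length ≤ n := by
          rw [List.length_eraseIdx_of_lt hj]
          simp only [List.length_cons] at hle ⊢
          omega
        rw [ih _ _ _ hlen']

-- ===== VERDICT (by name: the statement is the Claim_ definition above) =====
theorem modified_selection_sort_spec : Claim_equal_modified_selection_sort := by
  intro arr k _
  unfold Spec_modified_selection_sort modified_selection_sort modified_selection_sort_alt
  exact loop_eq k arr.length arr [] 0 (le_refl _)
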